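-- pv_equiv track=rewrite | github.com/SaiHarsha9992/CodeChef-Contest | ORDDIST.py | ordered_distances
-- ===== SOURCE A (Python) =====
-- def ordered_distances(n, x, y):
--     for i in range(n):
--
--         p = x[i]
--
--         ds = []
--         for j in range(n):
--
--             d = abs(x[j]-p)
--
--             ds.append((d, x[j]))
--
--         ds.sort()
--
--         sorted_y = [pair[1] for pair in ds]
--
--         if sorted_y == y:
--             return i+1
--
--     return -1
-- ===== SOURCE B (Python) =====
-- def ordered_distances(n, x, y):
--     # Pivot must be y[0]: the closest value to the pivot p is p itself, so a
--     # matching ordering always starts with the pivot's value. Sort once for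
--     # that single candidate value instead of once per index.
--     if n <= 0 or len(y) != n:
--         return -1
--     xs = x[:n]
--     p = y[0]
--     try:
--         i = xs.index(p)
--     except ValueError:
--         return -1
--     order = [v for _, v in sorted((abs(v - p), v) for v in xs)]
--     return i + 1 if order == y else -1
-- ===== Notes on version B (the rewrite author's own statement) =====
-- stated objective: faster
-- what changed: Instead of sorting the whole array once per candidate index (A), B uses the fact that a matching distance-ordering must start with the pivot's own value, so it sorts once for the single candidate pivot y[0], finds its first index with list.index, and compares once.
import Mathlib
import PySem

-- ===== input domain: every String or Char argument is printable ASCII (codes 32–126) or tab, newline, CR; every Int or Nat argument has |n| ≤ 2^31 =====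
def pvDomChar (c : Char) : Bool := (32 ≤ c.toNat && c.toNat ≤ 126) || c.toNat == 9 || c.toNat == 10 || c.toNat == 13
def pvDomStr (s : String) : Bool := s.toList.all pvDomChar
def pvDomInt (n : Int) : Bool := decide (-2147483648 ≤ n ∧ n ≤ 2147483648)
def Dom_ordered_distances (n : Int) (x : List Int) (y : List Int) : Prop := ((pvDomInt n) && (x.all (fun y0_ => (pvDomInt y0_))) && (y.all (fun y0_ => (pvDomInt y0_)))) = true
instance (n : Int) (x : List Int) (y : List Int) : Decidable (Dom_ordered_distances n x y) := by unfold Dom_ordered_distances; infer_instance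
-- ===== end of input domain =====

-- B replaces A's per-index sort (O(n^2 log n)) by one sort for the single candidate
-- pivot value y[0] plus one index lookup (O(n log n)); equal return values on Pre_.

-- ===== PORT A =====
def odLoop (n : Int) (x : List Int) (y : List Int) : List Int → Int
  | [] => -1
  | i :: rest =>
    let p := PySem.List.pyGetD x i 0
    let ds := (PySem.List.pyRange 0 n 1).map
      (fun j => (|PySem.List.pyGetD x j 0 - p|, PySem.List.pyGetD x j 0))
    let ds2 := PySem.List.sorted2 ds Prod.fst Prod.snd
    let sorted_y := ds2.map (fun pair => pair.2)
    if sorted_y = y then i + 1 else odLoop n x y rest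

def ordered_distances (n : Int) (x : List Int) (y : List Int) : Int :=
  odLoop n x y (PySem.List.pyRange 0 n 1)

-- ===== PORT B =====
def ordered_distances_alt (n : Int) (x : List Int) (y : List Int) : Int :=
  if n ≤ 0 ∨ (y.length : Int) ≠ n then -1
  else
    let xs := PySem.List.slice x none (some n)
    let p := PySem.List.pyGetD y 0 0
    match PySem.List.index? xs p with
    | none => -1
    | some i =>
      let order := (PySem.List.sorted2 (xs.map (fun v => (|v - p|, v))) Prod.fst Prod.snd).map
        (fun q => q.2)
      if order = y then (i : Int) + 1 else -1

-- ===== PRECONDITION & SPEC =====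
-- Pre_ excludes exactly the inputs where A raises IndexError: n larger than len(x).
def Pre_ordered_distances (n : Int) (x : List Int) (y : List Int) : Prop :=
  n ≤ (x.length : Int)
instance (n : Int) (x : List Int) (y : List Int) : Decidable (Pre_ordered_distances n x y) := by
  unfold Pre_ordered_distances; infer_instance

def pvWitness_ordered_distances : Int × List Int × List Int := (2, [1, 3], [3, 1])

def Spec_ordered_distances (n : Int) (x : List Int) (y : List Int) (out : Int) : Prop :=
  out = ordered_distances_alt n x y
instance (n : Int) (x : List Int) (y : List Int) (out : Int) : Decidable (Spec_ordered_distances n x y out) := by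
  unfold Spec_ordered_distances; infer_instance

-- ===== CLAIM (what is proved, stated in full; the proofs are below) =====
def Claim_equal_ordered_distances : Prop := ∀ (n : Int) (x : List Int) (y : List Int), Dom_ordered_distances n x y → Pre_ordered_distances n x y → Spec_ordered_distances n x y (ordered_distances n x y)


-- ===== LEMMAS AND PROOFS =====

-- strict lexicographic order on Int pairs (what Python's tuple sort compares by)
def pvLex (a b : Int × Int) : Prop := a.1 < b.1 ∨ (a.1 = b.1 ∧ a.2 < b.2)

def pvBefore (a b : Int × Int) : Bool :=
  decide (a.1 < b.1) || !decide (b.1 < a.1) && decide (a.2 < b.2)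

lemma pvBefore_iff (a b : Int × Int) : pvBefore a b = true ↔ pvLex a b := by
  simp [pvBefore, pvLex]; omega

lemma pvLex_trans {a b c : Int × Int} (h1 : pvLex a b) (h2 : pvLex b c) : pvLex a c := by
  unfold pvLex at *; omega

lemma pvLex_irrefl (a : Int × Int) : ¬ pvLex a a := by unfold pvLex; omega

lemma sorted2_eq_foldl (ds : List (Int × Int)) :
    PySem.List.sorted2 ds Prod.fst Prod.snd =
      ds.foldl (fun acc q => PySem.List.insertBy pvBefore q acc) [] := rfl

lemma insertBy_cons_eq (q a : Int × Int) (l : List (Int × Int)) :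
    PySem.List.insertBy pvBefore q (a :: l) =
      if pvBefore q a then q :: a :: l else a :: PySem.List.insertBy pvBefore q l := rfl

lemma pairwise_insertBy (q : Int × Int) (l : List (Int × Int))
    (h : l.Pairwise (fun a b => ¬ pvLex b a)) :
    (PySem.List.insertBy pvBefore q l).Pairwise (fun a b => ¬ pvLex b a) := by
  induction l with
  | nil => exact List.pairwise_singleton _ _
  | cons a l ih =>
    rcases List.pairwise_cons.mp h with ⟨ha, hl⟩
    rw [insertBy_cons_eq]
    split_ifs with hb
    · have hqa : pvLex q a := (pvBefore_iff q a).mp hb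
      refine List.pairwise_cons.mpr ⟨?_, h⟩
      intro z hz
      rcases List.mem_cons.mp hz with rfl | hz
      · exact fun hle => pvLex_irrefl q (pvLex_trans hqa hle)
      · intro hzq
        exact ha z hz (pvLex_trans hzq hqa)
    · refine List.pairwise_cons.mpr ⟨?_, ih hl⟩
      intro z hz
      rcases (PySem.List.mem_insertBy pvBefore q z l).mp hz with rfl | hz
      · intro hza
        exact hb ((pvBefore_iff z a).mpr hza)
      · exact ha z hz

lemma pairwise_foldl_insertBy (ds acc : List (Int × Int))
    (hacc : acc.Pairwise (fun a b => ¬ pvLex b a)) :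
    (ds.foldl (fun acc q => PySem.List.insertBy pvBefore q acc) acc).Pairwise
      (fun a b => ¬ pvLex b a) := by
  induction ds generalizing acc with
  | nil => exact hacc
  | cons q ds ih => exact ih _ (pairwise_insertBy q acc hacc)

lemma pairwise_sorted2 (ds : List (Int × Int)) :
    (PySem.List.sorted2 ds Prod.fst Prod.snd).Pairwise (fun a b => ¬ pvLex b a) := by
  rw [sorted2_eq_foldl]
  exact pairwise_foldl_insertBy ds [] (by simp)

-- the ordering of xs around pivot p: the shared shape of both ports' inner computation
def pvOrd (xs : List Int) (p : Int) : List Int :=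
  (PySem.List.sorted2 (xs.map (fun v => (|v - p|, v))) Prod.fst Prod.snd).map (fun q => q.2)

lemma pvOrd_perm (xs : List Int) (p : Int) : (pvOrd xs p).Perm xs := by
  unfold pvOrd
  have h1 := (PySem.List.sorted2_perm (xs.map (fun v => (|v - p|, v))) Prod.fst Prod.snd false).map
    (fun q : Int × Int => q.2)
  simpa [List.map_map, Function.comp_def] using h1

lemma pvOrd_length (xs : List Int) (p : Int) : (pvOrd xs p).length = xs.length :=
  (pvOrd_perm xs p).length_eq

lemma pvOrd_head (xs : List Int) (p : Int) (hp : p ∈ xs) :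
    ∃ t, pvOrd xs p = p :: t := by
  unfold pvOrd
  have hperm := PySem.List.sorted2_perm (xs.map (fun v => (|v - p|, v))) Prod.fst Prod.snd false
  have hmem : ((0 : Int), p) ∈ xs.map (fun v => (|v - p|, v)) :=
    List.mem_map.mpr ⟨p, hp, by simp⟩
  cases hs : PySem.List.sorted2 (xs.map (fun v => (|v - p|, v))) Prod.fst Prod.snd with
  | nil =>
    rw [hs] at hperm
    rw [hperm.symm.eq_nil] at hmem
    simp at hmem
  | cons m t =>
    rw [hs] at hperm
    have hm : m ∈ xs.map (fun v => (|v - p|, v)) := hperm.mem_iff.mp (by simp)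
    obtain ⟨v, hv, hveq⟩ := List.mem_map.mp hm
    have hpw := pairwise_sorted2 (xs.map (fun v => (|v - p|, v)))
    rw [hs] at hpw
    have h0p : ((0 : Int), p) ∈ m :: t := hperm.mem_iff.mpr hmem
    have hnot : ¬ pvLex (0, p) m := by
      rcases List.pairwise_cons.mp hpw with ⟨hhead, _⟩
      rcases List.mem_cons.mp h0p with h0p | h0p
      · rw [h0p]; exact pvLex_irrefl m
      · exact hhead _ h0p
    have hvp : v = p := by
      rw [← hveq] at hnot
      unfold pvLex at hnot
      simp only at hnot
      rcases abs_cases (v - p) with ⟨h1, h2⟩ | ⟨h1, h2⟩ <;> omega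
    subst hveq
    subst hvp
    exact ⟨t.map (fun q => q.2), by simp⟩

-- A's body at one index, as a named value (definitionally what odLoop tests)
def aTest (n : Int) (x : List Int) (i : Int) : List Int :=
  (PySem.List.sorted2
      ((PySem.List.pyRange 0 n 1).map
        (fun j => (|PySem.List.pyGetD x j 0 - PySem.List.pyGetD x i 0|, PySem.List.pyGetD x j 0)))
      Prod.fst Prod.snd).map (fun pair => pair.2)

lemma odLoop_cons (n : Int) (x y : List Int) (i : Int) (rest : List Int) :
    odLoop n x y (i :: rest) =
      if aTest n x i = y then i + 1 else odLoop n x y rest := rfl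

lemma map_pyGetD_range_take {β : Type} (x : List Int) (n : Int) (f : Int → β)
    (h : n ≤ (x.length : Int)) :
    (PySem.List.pyRange 0 n 1).map (fun j => f (PySem.List.pyGetD x j 0)) =
      (x.take n.toNat).map f := by
  rw [PySem.List.pyRange_one, List.map_map]
  apply List.ext_getElem
  · simp; omega
  · intro k h1 h2
    simp only [List.getElem_map, List.getElem_range, Function.comp_apply, zero_add,
      PySem.List.pyGetD_natCast]
    have hk : k < x.length := by simp at h2; omega
    rw [List.getElem_take, List.getD_eq_getElem x 0 hk]

lemma aTest_eq (n : Int) (x : List Int) (i : Int) (h : n ≤ (x.length : Int)) :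
    aTest n x i = pvOrd (x.take n.toNat) (PySem.List.pyGetD x i 0) := by
  unfold aTest pvOrd
  rw [map_pyGetD_range_take x n
    (fun v => (|v - PySem.List.pyGetD x i 0|, v)) h]

lemma odLoop_neg (n : Int) (x y : List Int) :
    ∀ L : List Int, (∀ i ∈ L, aTest n x i ≠ y) → odLoop n x y L = -1 := by
  intro L
  induction L with
  | nil => intro _; rfl
  | cons i rest ih =>
    intro h
    rw [odLoop_cons, if_neg (h i (by simp))]
    exact ih (fun j hj => h j (by simp [hj]))

lemma odLoop_find (n : Int) (x y : List Int) (y0 : Int) (xs : List Int)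
    (hlen : (xs.length : Int) = n)
    (hiff : ∀ (k : Nat) (hk : k < xs.length), (aTest n x (k : Int) = y ↔ xs[k] = y0)) :
    ∀ (a : Nat), a ≤ xs.length →
      odLoop n x y (PySem.List.pyRange (a : Int) n 1) =
        (match PySem.List.index? (xs.drop a) y0 with
         | some i => ((a + i : Nat) : Int) + 1
         | none => -1) := by
  intro a ha
  induction hd : xs.length - a generalizing a with
  | zero =>
    rw [PySem.List.pyRange_one_eq_nil (by omega)]
    rw [List.drop_of_length_le (by omega)]
    rfl
  | succ d ih =>
    have halt : a < xs.length := by omega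
    rw [PySem.List.pyRange_one_cons (by omega), odLoop_cons,
      List.drop_eq_getElem_cons halt]
    by_cases hEq : xs[a] = y0
    · rw [if_pos ((hiff a halt).mpr hEq), hEq, PySem.List.index?_cons_self]
      simp
    · rw [if_neg (fun hcon => hEq ((hiff a halt).mp hcon))]
      rw [PySem.List.index?_cons_of_ne _ hEq]
      have hcast : ((a : Int) + 1) = (((a + 1 : Nat) : Int)) := by push_cast; ring
      rw [hcast, ih (a + 1) (by omega) (by omega)]
      cases PySem.List.index? (xs.drop (a + 1)) y0 with
      | none => rfl
      | some i => simp; push_cast; ring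

-- B's value, with slice/let structure reduced away
lemma alt_char (n : Int) (x y : List Int) (hn : 0 < n) (hy : (y.length : Int) = n) :
    ordered_distances_alt n x y =
      (match PySem.List.index? (x.take n.toNat) (PySem.List.pyGetD y 0 0) with
       | none => -1
       | some i =>
         if pvOrd (x.take n.toNat) (PySem.List.pyGetD y 0 0) = y then (i : Int) + 1 else -1) := by
  unfold ordered_distances_alt
  rw [if_neg (by push_neg; exact ⟨by omega, hy⟩)]
  rw [PySem.List.slice_to x (le_of_lt hn)]
  rfl

-- ===== VERDICT =====
theorem ordered_distances_spec : Claim_equal_ordered_distances := by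
  intro n x y _ hpre
  unfold Spec_ordered_distances ordered_distances
  unfold Pre_ordered_distances at hpre
  by_cases hn : n ≤ 0
  · rw [PySem.List.pyRange_one_eq_nil (by omega)]
    unfold ordered_distances_alt
    rw [if_pos (Or.inl hn)]
    rfl
  · push_neg at hn
    set xs := x.take n.toNat with hxs
    have hxslen : (xs.length : Int) = n := by
      simp [hxs]; omega
    have hgetx : ∀ (k : Nat) (hk : k < xs.length), PySem.List.pyGetD x (k : Int) 0 = xs[k] := by
      intro k hk
      have hkx : k < x.length := by
        rw [hxs, List.length_take] at hk; omega
      rw [PySem.List.pyGetD_natCast, List.getD_eq_getElem x 0 hkx]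
      exact (List.getElem_take (xs := x) (j := n.toNat) (i := k)).symm
    by_cases hylen : (y.length : Int) = n
    · cases y with
      | nil => simp at hylen; omega
      | cons y0 ys =>
        have hgety0 : PySem.List.pyGetD (y0 :: ys) 0 0 = y0 := by
          simp [PySem.List.pyGetD_zero]
        rw [alt_char n x (y0 :: ys) hn hylen, hgety0, ← hxs]
        by_cases hord : pvOrd xs y0 = y0 :: ys
        · -- the ordering around y0 matches y: A finds the first index of y0
          have hiff : ∀ (k : Nat) (hk : k < xs.length),
              (aTest n x (k : Int) = y0 :: ys ↔ xs[k] = y0) := by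
            intro k hk
            rw [aTest_eq n x (k : Int) hpre, hgetx k hk]
            constructor
            · intro hA
              obtain ⟨t, ht⟩ := pvOrd_head xs xs[k] (List.getElem_mem hk)
              rw [ht] at hA
              exact (List.cons.injEq _ _ _ _ ▸ hA).1
            · intro hk0
              rw [hk0]; exact hord
          have hmain := odLoop_find n x (y0 :: ys) y0 xs hxslen hiff 0 (by omega)
          rw [Nat.cast_zero, List.drop_zero] at hmain
          rw [hmain]
          cases PySem.List.index? xs y0 with
          | none => rfl
          | some i => simp [hord]
        · -- no index matches: both return -1
          rw [odLoop_neg n x (y0 :: ys) _ ?_]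
          · cases PySem.List.index? xs y0 with
            | none => rfl
            | some i => simp [hord]
          · intro i hi hcon
            have hib := PySem.List.mem_pyRange_one.mp hi
            rw [aTest_eq n x i hpre] at hcon
            have hilt : i.toNat < xs.length := by
              rw [hxs, List.length_take]; omega
            have hieq : ((i.toNat : Nat) : Int) = i := by omega
            rw [← hieq, hgetx i.toNat hilt] at hcon
            obtain ⟨t, ht⟩ := pvOrd_head xs xs[i.toNat] (List.getElem_mem hilt)
            rw [ht] at hcon
            obtain ⟨hhd, htl⟩ := List.cons_eq_cons.mp hcon
            rw [hhd, htl] at ht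
            exact hord ht
    · -- length mismatch: A never matches, B's guard fires
      unfold ordered_distances_alt
      rw [if_pos (Or.inr hylen)]
      apply odLoop_neg
      intro i hi hcon
      rw [aTest_eq n x i hpre] at hcon
      have hlc : (pvOrd xs (PySem.List.pyGetD x i 0)).length = y.length := by rw [hcon]
      rw [pvOrd_length] at hlc
      apply hylen
      rw [← hlc]
      exact hxslen
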